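-- pv_equiv track=rewrite | github.com/kylevedder/BucketedSceneFlowEval | scripts/evals/av2_occ.py | _make_range_shards
-- ===== SOURCE A (Python) =====
-- def _make_range_shards(total_len: int, num_shards: int) -> list[tuple[int, int]]:
--     """
--     Return a list of tuples of (start, end) indices for each shard.
--
--     The function divides the range specified by total_len into num_shards shards.
--     Each shard is represented by a tuple of (start, end) indices.
--     The division tries to distribute the elements as evenly as possible among the shards.
--     """
--     shards = []
--     shard_len = total_len // num_shards
--     remainder = total_len % num_shards
--
--     start = 0
--     for _ in range(num_shards):
--         end = start + shard_len + (1 if remainder > 0 else 0)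
--         shards.append((start, min(end, total_len)))
--         start = end
--         remainder -= 1
--
--     return shards
-- ===== SOURCE B (Python) =====
-- def _make_range_shards(total_len: int, num_shards: int) -> list[tuple[int, int]]:
--     """Closed-form shard boundaries: shard i spans [i*q + min(i, r), (i+1)*q + min(i+1, r))."""
--     q, r = divmod(total_len, num_shards)
--     return [
--         (i * q + min(i, r), min((i + 1) * q + min(i + 1, r), total_len))
--         for i in range(num_shards)
--     ]
-- ===== Notes on version B (the rewrite author's own statement) =====
-- stated objective: simpler
-- what changed: Replaces the loop carrying running start/remainder accumulators with a single comprehension that computes each shard's boundaries independently from the closed form i*q + min(i, r).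
import Mathlib
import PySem

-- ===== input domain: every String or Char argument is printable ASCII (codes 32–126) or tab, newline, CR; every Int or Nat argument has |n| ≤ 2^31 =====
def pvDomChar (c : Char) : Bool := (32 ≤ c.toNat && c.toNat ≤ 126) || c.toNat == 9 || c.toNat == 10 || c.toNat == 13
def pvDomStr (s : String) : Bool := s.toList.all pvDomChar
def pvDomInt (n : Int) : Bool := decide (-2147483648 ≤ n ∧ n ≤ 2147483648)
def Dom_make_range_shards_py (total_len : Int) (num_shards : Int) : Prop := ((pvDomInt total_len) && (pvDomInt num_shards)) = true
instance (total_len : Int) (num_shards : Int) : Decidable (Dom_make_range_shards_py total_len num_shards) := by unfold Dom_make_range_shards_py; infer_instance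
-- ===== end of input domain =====

-- B replaces A's running start/remainder accumulators with a closed-form boundary per shard (objective: simpler).

-- ===== PORT A =====
def make_range_shards_py (total_len : Int) (num_shards : Int) : List (Int × Int) :=
  let shard_len := PySem.Int.floordiv total_len num_shards
  let remainder0 := PySem.Int.mod total_len num_shards
  let res :=
    (PySem.List.pyRange 0 num_shards 1).foldl
      (fun (st : List (Int × Int) × Int × Int) _ =>
        let shards := st.1
        let start := st.2.1
        let remainder := st.2.2
        let e := start + shard_len + (if remainder > 0 then (1 : Int) else 0)
        (shards ++ [(start, min e total_len)], e, remainder - 1))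
      ([], 0, remainder0)
  res.1

-- ===== PORT B =====
def make_range_shards_py_alt (total_len : Int) (num_shards : Int) : List (Int × Int) :=
  let q := PySem.Int.floordiv total_len num_shards
  let r := PySem.Int.mod total_len num_shards
  (PySem.List.pyRange 0 num_shards 1).map
    (fun i => (i * q + min i r, min ((i + 1) * q + min (i + 1) r) total_len))

-- ===== PRECONDITION & SPEC =====
-- Pre_ excludes num_shards = 0, on which the Python A raises ZeroDivisionError (B raises there too).
def Pre_make_range_shards_py (total_len : Int) (num_shards : Int) : Prop := num_shards ≠ 0
instance (total_len : Int) (num_shards : Int) : Decidable (Pre_make_range_shards_py total_len num_shards) := by unfold Pre_make_range_shards_py; infer_instance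
def pvWitness_make_range_shards_py : Int × Int := (10, 3)

def Spec_make_range_shards_py (total_len : Int) (num_shards : Int) (out : List (Int × Int)) : Prop := out = make_range_shards_py_alt total_len num_shards
instance (total_len : Int) (num_shards : Int) (out : List (Int × Int)) : Decidable (Spec_make_range_shards_py total_len num_shards out) := by unfold Spec_make_range_shards_py; infer_instance

-- ===== CLAIM (what is proved, stated in full; the proofs are below) =====
def Claim_equal_make_range_shards_py : Prop := ∀ (total_len : Int) (num_shards : Int), Dom_make_range_shards_py total_len num_shards → Pre_make_range_shards_py total_len num_shards → Spec_make_range_shards_py total_len num_shards (make_range_shards_py total_len num_shards)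

-- ===== LEMMAS AND PROOFS =====

-- Loop invariant: after processing shards k, k+1, …, the running start is k*q + min k r
-- and the remaining remainder is r - k; each produced pair is B's closed form.
theorem shards_loop_eq (total_len q r : Int) :
    ∀ (m : Nat) (k : Int) (acc : List (Int × Int)),
      ((PySem.List.pyRange k (k + m) 1).foldl
        (fun (st : List (Int × Int) × Int × Int) _ =>
          let shards := st.1
          let start := st.2.1
          let remainder := st.2.2
          let e := start + q + (if remainder > 0 then (1 : Int) else 0)
          (shards ++ [(start, min e total_len)], e, remainder - 1))
        (acc, k * q + min k r, r - k)).1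
      = acc ++ (PySem.List.pyRange k (k + m) 1).map
          (fun i => (i * q + min i r, min ((i + 1) * q + min (i + 1) r) total_len)) := by
  intro m
  induction m with
  | zero =>
    intro k acc
    rw [PySem.List.pyRange_one_eq_nil (by omega)]
    simp
  | succ n ih =>
    intro k acc
    rw [PySem.List.pyRange_one_cons (by omega : k < k + (n + 1 : Nat))]
    simp only [List.foldl_cons, List.map_cons]
    have hstep : k * q + min k r + q + (if r - k > 0 then (1 : Int) else 0)
        = (k + 1) * q + min (k + 1) r := by
      by_cases h : k < r
      · rw [if_pos (by omega)]
        have h1 : min k r = k := by omega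
        have h2 : min (k + 1) r = k + 1 := by omega
        rw [h1, h2]; ring
      · rw [if_neg (by omega)]
        have h1 : min k r = r := by omega
        have h2 : min (k + 1) r = r := by omega
        rw [h1, h2]; ring
    have hrange : k + (n + 1 : Nat) = (k + 1) + (n : Nat) := by push_cast; ring
    rw [hstep]
    have := ih (k + 1) (acc ++ [(k * q + min k r, min ((k + 1) * q + min (k + 1) r) total_len)])
    rw [hrange]
    have hrm1 : r - k - 1 = r - (k + 1) := by ring
    rw [hrm1]
    rw [this]
    simp

theorem make_range_shards_py_spec : Claim_equal_make_range_shards_py := by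
  intro total_len num_shards _ hpos
  unfold Pre_make_range_shards_py at hpos
  unfold Spec_make_range_shards_py make_range_shards_py make_range_shards_py_alt
  by_cases hp : 0 < num_shards
  · have hr : 0 ≤ PySem.Int.mod total_len num_shards := by
      rw [PySem.Int.mod_eq_emod_of_pos hp]
      exact Int.emod_nonneg total_len (by omega)
    have key := shards_loop_eq total_len (PySem.Int.floordiv total_len num_shards)
      (PySem.Int.mod total_len num_shards) num_shards.toNat 0 []
    rw [show (0 : Int) + (num_shards.toNat : Int) = num_shards from by omega] at key
    rw [show min (0 : Int) (PySem.Int.mod total_len num_shards) = 0 from by omega] at key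
    simp only [zero_mul, zero_add, sub_zero, List.nil_append] at key
    simp only []
    exact key
  · rw [PySem.List.pyRange_one_eq_nil (by omega)]
    simp
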